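-- pv_equiv track=rewrite | github.com/marinov98/AoC | 2023/day_14/day_14_puzzle.py | push_rocks
-- ===== SOURCE A (Python) =====
-- def push_rock_vertical(grid: list, r, c, invert: bool = False) -> int:
--     # slide rock as far up north as possible
--     curr_row = r - 1 if not invert else r + 1
--     limit = -1 if not invert else len(grid)
--     offset = -1 if not invert else 1
--     while curr_row != limit and grid[curr_row][c] not in "O#":
--         curr_row += offset
--     curr_row += offset * -1
--
--     # perform push (only if we moved of course)
--     if curr_row != r:
--         grid[curr_row][c] = "O"
--         grid[r][c] = "."
--     return curr_row
--
-- def push_rocks(grid: list) -> int: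
--     rows = len(grid)
--     cols = len(grid[0])
--     total_load = 0
--     for i in range(rows):
--         for j in range(cols):
--             if grid[i][j] == "O":
--                 curr_row = push_rock_vertical(grid, i, j)
--
--                 # calculate load
--                 total_load += rows - curr_row
--
--     return total_load
-- ===== SOURCE B (Python) =====
-- def push_rocks(grid: list) -> int:
--     # Single row-major pass with a per-column "next free row" pointer;
--     # never mutates grid (A mutates it in place).
--     rows = len(grid)
--     cols = len(grid[0])
--     free = [0] * cols
--     total = 0
--     for i in range(rows):
--         for j in range(cols):
--             cell = grid[i][j]
--             if cell == "O":
--                 total += rows - free[j]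
--                 free[j] += 1
--             elif cell in "O#":
--                 free[j] = i + 1
--     return total
-- ===== Notes on version B (the rewrite author's own statement) =====
-- stated objective: alternative
-- what changed: Replaces the in-place rock-sliding simulation (a while-loop scan upward for every rock, mutating the grid) by a single row-major pass keeping a per-column next-free-row pointer, reset below each blocker; the grid is never mutated.
import Mathlib
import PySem

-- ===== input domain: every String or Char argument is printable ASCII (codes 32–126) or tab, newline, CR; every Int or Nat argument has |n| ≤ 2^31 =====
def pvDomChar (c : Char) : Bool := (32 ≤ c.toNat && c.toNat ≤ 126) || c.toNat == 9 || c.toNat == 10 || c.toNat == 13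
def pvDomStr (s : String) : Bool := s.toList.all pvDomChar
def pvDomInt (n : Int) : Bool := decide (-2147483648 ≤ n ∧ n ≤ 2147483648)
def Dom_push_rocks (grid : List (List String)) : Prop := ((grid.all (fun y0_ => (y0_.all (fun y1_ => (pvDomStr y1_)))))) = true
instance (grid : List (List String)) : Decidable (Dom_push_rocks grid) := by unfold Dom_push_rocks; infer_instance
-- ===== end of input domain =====

-- B replaces A's per-rock upward while-loop simulation (which mutates the grid in place;
-- the equivalence proved here is about the RETURN value only — B performs no mutation)
-- by one row-major pass with a per-column next-free-row pointer.

-- ===== PORT A =====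
-- grid[r][c]; the "?" default is only reached where Python raises IndexError (excluded by Pre_)
def pvCell (g : List (List String)) (r c : Int) : String :=
  ((PySem.List.pyGet? g r).bind (fun row => PySem.List.pyGet? row c)).getD "?"

-- grid[r][c] = v; every call has 0 ≤ r < len(grid) and 0 ≤ c < len(grid[r]), where .toNat is exact
def pvSet (g : List (List String)) (r c : Int) (v : String) : List (List String) :=
  g.set r.toNat ((g.getD r.toNat []).set c.toNat v)

-- the while-loop of push_rock_vertical; fuel bounds the iteration count (len(grid)+1 suffices
-- for the in-range calls push_rocks makes)
def pvWhile (g : List (List String)) (c limit offset curr : Int) (fuel : Nat) : Int :=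
  match fuel with
  | 0 => curr
  | fuel + 1 =>
    if curr ≠ limit ∧ PySem.Str.isIn (pvCell g curr c) "O#" = false then
      pvWhile g c limit offset (curr + offset) fuel
    else curr

def push_rock_vertical (g : List (List String)) (r c : Int) (invert : Bool) :
    List (List String) × Int :=
  let curr0 : Int := if invert = false then r - 1 else r + 1
  let limit : Int := if invert = false then -1 else (g.length : Int)
  let offset : Int := if invert = false then -1 else 1
  let curr1 := pvWhile g c limit offset curr0 (g.length + 1)
  let curr := curr1 + offset * (-1)
  if curr ≠ r then (pvSet (pvSet g curr c "O") r c ".", curr) else (g, curr)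

-- body of A's inner loop: state = (grid, total_load)
def pvStepA (rows : Int) (st : List (List String) × Int) (i j : Int) :
    List (List String) × Int :=
  if pvCell st.1 i j = "O" then
    let p := push_rock_vertical st.1 i j false
    (p.1, st.2 + (rows - p.2))
  else st

def push_rocks (grid : List (List String)) : Int :=
  let rows : Int := grid.length
  let cols : Int := ((PySem.List.pyGet? grid 0).getD []).length
  ((PySem.List.pyRange 0 rows 1).foldl
    (fun st i => (PySem.List.pyRange 0 cols 1).foldl (fun st j => pvStepA rows st i j) st)
    (grid, 0)).2

-- ===== PORT B =====
-- body of B's single pass: state = (total, free) where free[j] is column j's next free row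
def pvStepB (grid : List (List String)) (rows : Int) (st : Int × List Int) (i j : Int) :
    Int × List Int :=
  let cell := pvCell grid i j
  if cell = "O" then
    let f := (PySem.List.pyGet? st.2 j).getD 0
    (st.1 + (rows - f), st.2.set j.toNat (f + 1))
  else if PySem.Str.isIn cell "O#" = true then
    (st.1, st.2.set j.toNat (i + 1))
  else st

def push_rocks_alt (grid : List (List String)) : Int :=
  let rows : Int := grid.length
  let colsN : Nat := ((PySem.List.pyGet? grid 0).getD []).length
  ((PySem.List.pyRange 0 rows 1).foldl
    (fun st i =>
      (PySem.List.pyRange 0 (colsN : Int) 1).foldl (fun st j => pvStepB grid rows st i j) st)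
    (0, List.replicate colsN 0)).1

-- ===== PRECONDITION & SPEC =====
-- Pre_ excludes exactly the inputs where A raises IndexError: the empty grid (grid[0]) and
-- grids with a row shorter than row 0 (grid[i][j] for j < len(grid[0])).
def Pre_push_rocks (grid : List (List String)) : Prop :=
  grid ≠ [] ∧ ∀ row ∈ grid, (grid.headD []).length ≤ row.length

instance (grid : List (List String)) : Decidable (Pre_push_rocks grid) := by
  unfold Pre_push_rocks; infer_instance

def pvWitness_push_rocks : List (List String) :=
  [[".", "O"], ["O", "#"], ["O", "O"]]

def Spec_push_rocks (grid : List (List String)) (out : Int) : Prop := out = push_rocks_alt grid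
instance (grid : List (List String)) (out : Int) : Decidable (Spec_push_rocks grid out) := by
  unfold Spec_push_rocks; infer_instance

-- ===== CLAIM (what is proved, stated in full; the proofs are below) =====
def Claim_equal_push_rocks : Prop := ∀ (grid : List (List String)), Dom_push_rocks grid → Pre_push_rocks grid → Spec_push_rocks grid (push_rocks grid)

-- ===== LEMMAS AND PROOFS =====

-- total cell read with Nat indices, for the proofs
def ccell (g : List (List String)) (k c : Nat) : String :=
  ((g[k]?.bind (fun row => row[c]?)).getD "?")

-- rows of column c processed so far, when the row-major pass stands at cell (i, j)
def procd (i j c : Nat) : Nat := if c < j then i + 1 else i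

-- per-column invariant: free[c] is the next free row f; rows ≥ p are untouched; rows in
-- [f, p) hold no blocker; row f-1 holds a blocker (or f = 0)
def ColInv (g0 g : List (List String)) (free : List Int) (p c : Nat) : Prop :=
  ∃ f : Nat, free[c]? = some (f : Int) ∧ f ≤ p ∧
    (∀ k, p ≤ k → ccell g k c = ccell g0 k c) ∧
    (∀ k, f ≤ k → k < p → PySem.Str.isIn (ccell g k c) "O#" = false) ∧
    (f = 0 ∨ PySem.Str.isIn (ccell g (f - 1) c) "O#" = true)

def pvInv (g0 g : List (List String)) (free : List Int) (i j : Nat) : Prop :=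
  g.length = g0.length ∧
  (∀ k : Nat, g[k]?.map List.length = g0[k]?.map List.length) ∧
  free.length = (g0.headD []).length ∧
  ∀ c, c < (g0.headD []).length → ColInv g0 g free (procd i j c) c

def pvRel (g0 : List (List String)) (stA : List (List String) × Int) (stB : Int × List Int)
    (i j : Nat) : Prop :=
  stA.2 = stB.1 ∧ pvInv g0 stA.1 stB.2 i j

lemma pvCell_natCast (g : List (List String)) (k c : Nat) :
    pvCell g (k : Int) (c : Int) = ccell g k c := by
  simp [pvCell, ccell]

lemma length_pvSet (g : List (List String)) (r c : Int) (v : String) :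
    (pvSet g r c v).length = g.length := by
  simp [pvSet]

lemma rowlens_pvSet (g : List (List String)) (r c : Int) (v : String) (k : Nat) :
    (pvSet g r c v)[k]?.map List.length = g[k]?.map List.length := by
  simp only [pvSet, List.getElem?_set]
  by_cases h : r.toNat = k
  · subst h
    by_cases hk : r.toNat < g.length
    · simp [hk, List.getD_eq_getElem?_getD]
    · simp [hk]
  · simp [h]

lemma ccell_pvSet_ne (g : List (List String)) (r c : Nat) (v : String) (k c' : Nat)
    (h : k ≠ r ∨ c' ≠ c) :
    ccell (pvSet g (r : Int) (c : Int) v) k c' = ccell g k c' := by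
  simp only [ccell, pvSet, Int.toNat_natCast, List.getElem?_set]
  by_cases hkr : r = k
  · subst hkr
    rcases h with h | h
    · exact absurd rfl h
    · by_cases hr : r < g.length
      · simp [hr, List.getD_eq_getElem?_getD, List.getElem?_set_ne (fun hc => h hc.symm)]
      · simp [hr]
  · simp [hkr]

lemma ccell_pvSet_self (g : List (List String)) (r c : Nat) (v : String) (row : List String)
    (hrow : g[r]? = some row) (hc : c < row.length) :
    ccell (pvSet g (r : Int) (c : Int) v) r c = v := by
  have hr : r < g.length := by
    rcases List.getElem?_eq_some_iff.mp hrow with ⟨h, _⟩; exact h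
  simp only [ccell, pvSet, Int.toNat_natCast, List.getElem?_set, if_pos hr]
  have : g.getD r [] = row := by simp [List.getD_eq_getElem?_getD, hrow]
  rw [this]
  simp [List.getElem?_set_self (by omega : c < row.length)]

lemma pvWhile_lands (g : List (List String)) (c f : Nat)
    (hstop : f = 0 ∨ PySem.Str.isIn (ccell g (f - 1) c) "O#" = true) :
    ∀ (fuel m : Nat), f ≤ m → m - f < fuel →
    (∀ k, f ≤ k → k < m → PySem.Str.isIn (ccell g k c) "O#" = false) →
    pvWhile g (c : Int) (-1) (-1) ((m : Int) - 1) fuel = (f : Int) - 1 := by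
  intro fuel
  induction fuel with
  | zero => intro m hfm hlt _; omega
  | succ fuel ih =>
    intro m hfm hlt hns
    by_cases hm : f = m
    · subst hm
      rcases Nat.eq_zero_or_pos f with h0 | hpos
      · subst h0
        simp [pvWhile]
      · have hcast : ((f : Int) - 1) = ((f - 1 : Nat) : Int) := by omega
        have hs : PySem.Str.isIn (ccell g (f - 1) c) "O#" = true := by
          rcases hstop with h0 | hs
          · omega
          · exact hs
        simp only [pvWhile, hcast, pvCell_natCast, hs]
        simp
    · have hlt' : f < m := lt_of_le_of_ne hfm hm
      have hcast : ((m : Int) - 1) = ((m - 1 : Nat) : Int) := by omega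
      have hne : ((m - 1 : Nat) : Int) ≠ -1 := by omega
      have hns' : PySem.Str.isIn (ccell g (m - 1) c) "O#" = false := hns _ (by omega) (by omega)
      simp only [pvWhile, hcast, pvCell_natCast, hns']
      have hcast2 : ((m - 1 : Nat) : Int) + -1 = ((m - 1 : Nat) : Int) - 1 := by omega
      rw [hcast2, ih (m - 1) (by omega) (by omega) (fun k hk1 hk2 => hns k hk1 (by omega))]
      simp [hne]

lemma procd_self (i j : Nat) : procd i j j = i := by simp [procd]

lemma procd_succ_self (i j : Nat) : procd i (j + 1) j = i + 1 := by simp [procd]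

lemma procd_succ_ne (i j c : Nat) (h : c ≠ j) : procd i (j + 1) c = procd i j c := by
  unfold procd; split <;> split <;> omega

-- a column other than j is untouched by a write at column j, and its free entry by a set at j
lemma colinv_other (g0 g g' : List (List String)) (free free' : List Int) (p c j : Nat)
    (hc : c ≠ j) (hcell : ∀ k c', c' ≠ j → ccell g' k c' = ccell g k c')
    (hfree : free'[c]? = free[c]?) (h : ColInv g0 g free p c) : ColInv g0 g' free' p c := by
  rcases h with ⟨f, hf, hfle, hunt, hns, hstop⟩
  exact ⟨f, by rw [hfree]; exact hf, hfle,
    fun k hk => by rw [hcell k c hc]; exact hunt k hk,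
    fun k hk1 hk2 => by rw [hcell k c hc]; exact hns k hk1 hk2,
    by rcases hstop with h0 | hs
       · exact Or.inl h0
       · exact Or.inr (by rw [hcell _ c hc]; exact hs)⟩

lemma pv_row_exists (g0 g : List (List String)) (hPre : Pre_push_rocks g0)
    (hrl : ∀ k : Nat, g[k]?.map List.length = g0[k]?.map List.length) (k : Nat)
    (hk : k < g0.length) :
    ∃ row, g[k]? = some row ∧ (g0.headD []).length ≤ row.length := by
  have h0 : g0[k]? = some g0[k] := List.getElem?_eq_getElem hk
  have hh := hrl k
  rw [h0] at hh
  cases hg : g[k]? with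
  | none => rw [hg] at hh; simp at hh
  | some row =>
    rw [hg] at hh
    simp only [Option.map_some, Option.some.injEq] at hh
    exact ⟨row, rfl, hh ▸ hPre.2 _ (List.getElem_mem hk)⟩

lemma step_preserve (g0 : List (List String)) (hPre : Pre_push_rocks g0) (i j : Nat)
    (hi : i < g0.length) (hj : j < (g0.headD []).length)
    (stA : List (List String) × Int) (stB : Int × List Int)
    (h : pvRel g0 stA stB i j) :
    pvRel g0 (pvStepA (g0.length : Int) stA (i : Int) (j : Int))
          (pvStepB g0 (g0.length : Int) stB (i : Int) (j : Int)) i (j + 1) := by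
  obtain ⟨htot, hglen, hrowlens, hflen, hcols⟩ := h
  have hcol := hcols j hj
  rw [procd_self] at hcol
  obtain ⟨f, hf, hfle, hunt, hns, hstop⟩ := hcol
  have hcellij : ccell stA.1 i j = ccell g0 i j := hunt i (le_refl i)
  have hjf : j < stB.2.length := by rw [hflen]; exact hj
  have sO : PySem.Str.isIn "O" "O#" = true := by decide
  have sDot : PySem.Str.isIn "." "O#" = false := by decide
  by_cases hO : ccell g0 i j = "O"
  · -- a rock: A slides it to row f, B reads free[j] = f
    have hwhile : pvWhile stA.1 (j : Int) (-1) (-1) ((i : Int) - 1) (stA.1.length + 1)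
        = (f : Int) - 1 := by
      refine pvWhile_lands stA.1 j f hstop (stA.1.length + 1) i hfle ?_ hns
      rw [hglen]; omega
    have hA : pvStepA (g0.length : Int) stA (i : Int) (j : Int) =
        ((if (f : Int) ≠ (i : Int) then pvSet (pvSet stA.1 (f : Int) (j : Int) "O") (i : Int) (j : Int) "." else stA.1),
          stA.2 + ((g0.length : Int) - (f : Int))) := by
      simp only [pvStepA, pvCell_natCast, hcellij, hO, push_rock_vertical]
      norm_num [hwhile]
      constructor
      · by_cases hfi : f = i
        · simp [hfi]
        · simp [hfi]
      · by_cases hfi : f = i <;> simp [hfi]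
    have hB : pvStepB g0 (g0.length : Int) stB (i : Int) (j : Int) =
        (stB.1 + ((g0.length : Int) - (f : Int)), stB.2.set j ((f : Int) + 1)) := by
      simp only [pvStepB, pvCell_natCast, hO]
      simp [hf]
    rw [hA, hB]
    refine ⟨by simp [htot], ?_, ?_, ?_, ?_⟩
    · split <;> simp [length_pvSet, hglen]
    · intro k
      split <;> simp only [rowlens_pvSet] <;> exact hrowlens k
    · simp [hflen]
    · intro c hc
      by_cases hcj : c = j
      · subst hcj
        rw [procd_succ_self]
        -- new column invariant for column c = j with free pointer f + 1
        have hfree' : (stB.2.set c ((f : Int) + 1))[c]? = some (((f + 1 : Nat) : Int)) := by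
          simp [hjf]
        by_cases hfi : f = i
        · -- the rock did not move
          subst hfi
          have hG : (if (f : Int) ≠ (f : Int) then pvSet (pvSet stA.1 (f : Int) (c : Int) "O") (f : Int) (c : Int) "." else stA.1) = stA.1 := by simp
          rw [hG]
          refine ⟨f + 1, hfree', by omega, fun k hk => hunt k (by omega),
            fun k hk1 hk2 => absurd hk2 (by omega), Or.inr ?_⟩
          have hsucc : f + 1 - 1 = f := by omega
          rw [hsucc, hcellij, hO]
          exact sO
        · -- the rock moved from row i up to row f
          have hG : (if (f : Int) ≠ (i : Int) then pvSet (pvSet stA.1 (f : Int) (c : Int) "O") (i : Int) (c : Int) "." else stA.1) = pvSet (pvSet stA.1 (f : Int) (c : Int) "O") (i : Int) (c : Int) "." := by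
            simp; omega
          rw [hG]
          set G1 := pvSet stA.1 (f : Int) (c : Int) "O" with hG1
          set G2 := pvSet G1 (i : Int) (c : Int) "." with hG2
          obtain ⟨rowi, hrowi, hrowilen⟩ := pv_row_exists g0 G1 hPre
            (fun k => (rowlens_pvSet _ _ _ _ k).trans (hrowlens k)) i hi
          have hGi : ccell G2 i c = "." := ccell_pvSet_self G1 i c "." rowi hrowi (by omega)
          obtain ⟨rowf, hrowf, hrowflen⟩ := pv_row_exists g0 stA.1 hPre hrowlens f (by omega)
          have hGf : ccell G2 f c = "O" := by
            rw [ccell_pvSet_ne G1 i c "." f c (Or.inl hfi)]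
            exact ccell_pvSet_self stA.1 f c "O" rowf hrowf (by omega)
          refine ⟨f + 1, hfree', by omega, ?_, ?_, Or.inr ?_⟩
          · intro k hk
            rw [ccell_pvSet_ne G1 i c "." k c (Or.inl (by omega)),
              ccell_pvSet_ne stA.1 f c "O" k c (Or.inl (by omega))]
            exact hunt k (by omega)
          · intro k hk1 hk2
            by_cases hki : k = i
            · subst hki; rw [hGi]; exact sDot
            · rw [ccell_pvSet_ne G1 i c "." k c (Or.inl hki),
                ccell_pvSet_ne stA.1 f c "O" k c (Or.inl (by omega))]
              exact hns k (by omega) (by omega)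
          · have hsucc : f + 1 - 1 = f := by omega
            rw [hsucc, hGf]
            exact sO
      · -- other columns are untouched
        rw [procd_succ_ne i j c hcj]
        have hcol' := hcols c hc
        refine colinv_other g0 stA.1 _ stB.2 _ (procd i j c) c j hcj ?_ ?_ hcol'
        · intro k c' hc'
          split
          · rw [ccell_pvSet_ne _ i j "." k c' (Or.inr hc'),
              ccell_pvSet_ne stA.1 f j "O" k c' (Or.inr hc')]
          · rfl
        · rw [List.getElem?_set_ne (fun hh => hcj hh.symm)]
  · -- not a rock: A leaves everything unchanged
    have hA : pvStepA (g0.length : Int) stA (i : Int) (j : Int) = stA := by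
      simp only [pvStepA, pvCell_natCast, hcellij]
      simp [hO]
    rw [hA]
    by_cases hs : PySem.Str.isIn (ccell g0 i j) "O#" = true
    · -- a blocker: B resets free[j] to i + 1
      have hB : pvStepB g0 (g0.length : Int) stB (i : Int) (j : Int) =
          (stB.1, stB.2.set j ((i : Int) + 1)) := by
        simp only [pvStepB, pvCell_natCast]
        rw [if_neg hO, if_pos hs]
        simp
      rw [hB]
      refine ⟨htot, hglen, hrowlens, by simp [hflen], ?_⟩
      intro c hc
      by_cases hcj : c = j
      · subst hcj
        rw [procd_succ_self]
        refine ⟨i + 1, by simp [hjf], le_refl _,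
          fun k hk => hunt k (by omega), fun k hk1 hk2 => absurd hk2 (by omega),
          Or.inr ?_⟩
        have hsucc : i + 1 - 1 = i := by omega
        rw [hsucc, hcellij]
        exact hs
      · rw [procd_succ_ne i j c hcj]
        exact colinv_other g0 stA.1 stA.1 stB.2 _ (procd i j c) c j hcj
          (fun _ _ _ => rfl) (List.getElem?_set_ne (fun hh => hcj hh.symm)) (hcols c hc)
    · -- plain floor: B changes nothing
      have hB : pvStepB g0 (g0.length : Int) stB (i : Int) (j : Int) = stB := by
        simp only [pvStepB, pvCell_natCast]
        rw [if_neg hO, if_neg hs]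
      rw [hB]
      refine ⟨htot, hglen, hrowlens, hflen, ?_⟩
      intro c hc
      by_cases hcj : c = j
      · subst hcj
        rw [procd_succ_self]
        refine ⟨f, hf, by omega, fun k hk => hunt k (by omega), ?_, hstop⟩
        intro k hk1 hk2
        by_cases hki : k = i
        · subst hki
          rw [hcellij]
          exact eq_false_of_ne_true hs
        · exact hns k hk1 (by omega)
      · rw [procd_succ_ne i j c hcj]
        exact hcols c hc

lemma inner_loop (g0 : List (List String)) (hPre : Pre_push_rocks g0) (i : Nat)
    (hi : i < g0.length) :
    ∀ (d j : Nat), j + d = (g0.headD []).length →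
    ∀ stA stB, pvRel g0 stA stB i j →
    pvRel g0 ((PySem.List.pyRange (j : Int) ((g0.headD []).length : Int) 1).foldl
              (fun st jj => pvStepA (g0.length : Int) st (i : Int) jj) stA)
          ((PySem.List.pyRange (j : Int) ((g0.headD []).length : Int) 1).foldl
              (fun st jj => pvStepB g0 (g0.length : Int) st (i : Int) jj) stB)
          i (g0.headD []).length := by
  intro d
  induction d with
  | zero =>
    intro j hj stA stB h
    have hj' : j = (g0.headD []).length := by omega
    subst hj'
    rw [PySem.List.pyRange_one_eq_nil (le_refl _)]
    exact h
  | succ d ih =>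
    intro j hj stA stB h
    have hjlt : j < (g0.headD []).length := by omega
    rw [PySem.List.pyRange_one_cons (by exact_mod_cast hjlt)]
    simp only [List.foldl_cons]
    have hcast : ((j : Int) + 1) = ((j + 1 : Nat) : Int) := by omega
    rw [hcast]
    exact ih (j + 1) (by omega) _ _ (step_preserve g0 hPre i j hi hjlt stA stB h)

lemma row_shift (g0 : List (List String)) (g : List (List String)) (free : List Int) (i : Nat)
    (h : pvInv g0 g free i (g0.headD []).length) : pvInv g0 g free (i + 1) 0 := by
  obtain ⟨h1, h2, h3, h4⟩ := h
  refine ⟨h1, h2, h3, fun c hc => ?_⟩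
  have := h4 c hc
  have hp : procd i (g0.headD []).length c = procd (i + 1) 0 c := by
    unfold procd; split <;> split <;> omega
  rw [hp] at this
  exact this

lemma outer_loop (g0 : List (List String)) (hPre : Pre_push_rocks g0) :
    ∀ (d i : Nat), i + d = g0.length →
    ∀ stA stB, pvRel g0 stA stB i 0 →
    pvRel g0 ((PySem.List.pyRange (i : Int) (g0.length : Int) 1).foldl
              (fun st ii => (PySem.List.pyRange 0 ((g0.headD []).length : Int) 1).foldl
                  (fun st jj => pvStepA (g0.length : Int) st ii jj) st) stA)
          ((PySem.List.pyRange (i : Int) (g0.length : Int) 1).foldl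
              (fun st ii => (PySem.List.pyRange 0 ((g0.headD []).length : Int) 1).foldl
                  (fun st jj => pvStepB g0 (g0.length : Int) st ii jj) st) stB)
          g0.length 0 := by
  intro d
  induction d with
  | zero =>
    intro i hi stA stB h
    have hi' : i = g0.length := by omega
    subst hi'
    rw [PySem.List.pyRange_one_eq_nil (le_refl _)]
    exact h
  | succ d ih =>
    intro i hi stA stB h
    have hilt : i < g0.length := by omega
    rw [PySem.List.pyRange_one_cons (a := (i : Int)) (b := (g0.length : Int))
      (by exact_mod_cast hilt)]
    simp only [List.foldl_cons]
    have hcast : ((i : Int) + 1) = ((i + 1 : Nat) : Int) := by omega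
    rw [hcast]
    have hstep := inner_loop g0 hPre i hilt (g0.headD []).length 0 (by omega) stA stB h
    rw [Nat.cast_zero] at hstep
    exact ih (i + 1) (by omega) _ _ ⟨hstep.1, row_shift g0 _ _ i hstep.2⟩

lemma init_rel (g0 : List (List String)) :
    pvRel g0 (g0, 0) (0, List.replicate (g0.headD []).length 0) 0 0 := by
  refine ⟨rfl, rfl, fun k => rfl, by simp, fun c hc => ?_⟩
  refine ⟨0, ?_, by simp [procd], fun k _ => rfl, fun k hk1 hk2 => absurd hk2 (by simp [procd]), Or.inl rfl⟩
  simp only [List.getElem?_replicate]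
  rw [if_pos hc]
  simp

-- ===== VERDICT (by name: the statement is the Claim_ definition above) =====
theorem push_rocks_spec : Claim_equal_push_rocks := by
  intro grid _hDom hPre
  unfold Spec_push_rocks
  have hne : grid ≠ [] := hPre.1
  have hcols : ((PySem.List.pyGet? grid 0).getD []).length = (grid.headD []).length := by
    cases grid with
    | nil => exact absurd rfl hne
    | cons a l => simp [PySem.List.pyGet?, PySem.List.pyIdx?]
  have hmain := outer_loop grid hPre grid.length 0 (by omega) (grid, 0)
    (0, List.replicate (grid.headD []).length 0) (init_rel grid)
  rw [Nat.cast_zero] at hmain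
  unfold push_rocks push_rocks_alt
  rw [hcols]
  exact hmain.1
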